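-- pv_equiv track=rewrite | github.com/WocherZ/Project-Alice | parsing_timetable.py | selection_text
-- ===== SOURCE A (Python) =====
-- def selection_text(string):
--     out = []
--     check_tag = False
--     if string[0] == "<":
--         check_tag = True
--     for el in string:
--         if el == "<":
--             check_tag = True
--         elif check_tag is False:
--             out.append(el)
--         elif el == ">":
--             check_tag = False
--     return ''.join(out)
-- ===== SOURCE B (Python) =====
-- def selection_text(string):
--     out = []
--     i = 0
--     while True:
--         lt = string.find('<', i)
--         if lt == -1:
--             out.append(string[i:])
--             break
--         out.append(string[i:lt])
--         gt = string.find('>', lt)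
--         if gt == -1:
--             break
--         i = gt + 1
--     return ''.join(out)
-- ===== Notes on version B (the rewrite author's own statement) =====
-- stated objective: faster
-- what changed: B replaces A's per-character flag machine with chunk-wise slicing driven by str.find jumps ('<' then '>') and a final join, so the scanning runs in C-level find/slice instead of a Python-level loop; Pre_ excludes only the empty string, on which A raises IndexError.
import Mathlib
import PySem

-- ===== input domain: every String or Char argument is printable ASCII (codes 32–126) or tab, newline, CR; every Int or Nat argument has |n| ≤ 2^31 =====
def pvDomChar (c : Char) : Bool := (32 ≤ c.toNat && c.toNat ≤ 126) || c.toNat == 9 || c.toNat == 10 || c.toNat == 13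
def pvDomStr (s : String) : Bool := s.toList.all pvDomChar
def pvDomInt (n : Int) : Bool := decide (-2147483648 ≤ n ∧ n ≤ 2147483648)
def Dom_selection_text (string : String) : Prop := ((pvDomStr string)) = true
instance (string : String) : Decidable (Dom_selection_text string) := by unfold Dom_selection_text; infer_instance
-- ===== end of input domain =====

-- B strips tag contents by find-jump chunk slicing instead of A's per-character flag machine (objective: faster, constant-factor; measured).
-- Return-value equivalence only; neither version mutates its argument.

-- ===== PORT A =====
-- A's loop state: (out, check_tag); branches in A's order.
def pvStepA (st : List Char × Bool) (el : Char) : List Char × Bool :=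
  if el = '<' then (st.1, true)
  else if st.2 = false then (st.1 ++ [el], st.2)
  else if el = '>' then (st.1, false)
  else st

def selection_text (string : String) : String :=
  let cs := string.toList
  -- string[0] == "<"  (on the empty string Python raises IndexError; excluded by Pre_)
  let check_tag : Bool := PySem.List.pyGet? cs 0 == some '<'
  String.ofList (List.foldl pvStepA ([], check_tag) cs).1

-- ===== PORT B =====
-- Source B's while loop, on the remaining suffix: lt = find('<'), emit chunk, gt = find('>'), jump past it.
def pvGoB (cs : List Char) : List Char :=
  let lt := PySem.Chars.find cs ['<']
  if hlt : lt = -1 then cs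
  else
    let rest := cs.drop lt.toNat
    let gt := PySem.Chars.find rest ['>']
    if gt = -1 then cs.take lt.toNat
    else cs.take lt.toNat ++ pvGoB (rest.drop (gt.toNat + 1))
termination_by cs.length
decreasing_by
  have hinf : ['<'] <:+: cs := (PySem.Chars.find_ne_neg_one_iff cs ['<']).mp hlt
  have hlen : 0 < cs.length := by
    have := hinf.length_le; simp at this; omega
  simp [List.length_drop]; omega

def selection_text_alt (string : String) : String :=
  String.ofList (pvGoB string.toList)

-- ===== PRECONDITION & SPEC =====
-- Pre_ excludes only the empty string, on which Python A raises IndexError at string[0].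
def Pre_selection_text (string : String) : Prop := string ≠ ""
instance (string : String) : Decidable (Pre_selection_text string) := by unfold Pre_selection_text; infer_instance

def pvWitness_selection_text : String := "a<b>c"

def Spec_selection_text (string : String) (out : String) : Prop := out = selection_text_alt string
instance (string : String) (out : String) : Decidable (Spec_selection_text string out) := by unfold Spec_selection_text; infer_instance

-- ===== CLAIM (what is proved, stated in full; the proofs are below) =====
def Claim_equal_selection_text : Prop := ∀ (string : String), Dom_selection_text string → Pre_selection_text string → Spec_selection_text string (selection_text string)

-- ===== LEMMAS AND PROOFS =====

lemma pv_singleton_prefix (c : Char) (l : List Char) : [c] <+: l ↔ l.head? = some c := by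
  cases l with
  | cons a t =>
      constructor
      · rintro ⟨s, hs⟩; simp at hs; simp [hs.1]
      · intro h; simp at h; exact ⟨t, by simp [h]⟩
  | nil => simp

-- splitting a list at the first occurrence of a single character, via PySem.Chars.find
lemma pv_find_char_split (l : List Char) (c : Char)
    (h : PySem.Chars.find l [c] ≠ -1) :
    (PySem.Chars.find l [c]).toNat < l.length ∧
    l = l.take (PySem.Chars.find l [c]).toNat ++ c :: l.drop ((PySem.Chars.find l [c]).toNat + 1) ∧
    (∀ x ∈ l.take (PySem.Chars.find l [c]).toNat, x ≠ c) := by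
  have hinf : [c] <:+: l := (PySem.Chars.find_ne_neg_one_iff l [c]).mp h
  have h0 : 0 ≤ PySem.Chars.find l [c] := (PySem.Chars.find_nonneg_iff l [c]).mpr hinf
  obtain ⟨hpre, hmin⟩ := PySem.Chars.find_spec h0
  set k := (PySem.Chars.find l [c]).toNat with hk
  have hhead : (l.drop k).head? = some c := (pv_singleton_prefix c _).mp hpre
  have hget : l[k]? = some c := by rw [← List.head?_drop]; exact hhead
  have hklt : k < l.length := by
    by_contra hle
    rw [List.getElem?_eq_none (by omega)] at hget; simp at hget
  refine ⟨hklt, ?_, ?_⟩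
  · have hd : l.drop k = c :: l.drop (k+1) := by
      rcases hdd : l.drop k with _ | ⟨a, t⟩
      · simp [hdd] at hhead
      · have ha : a = c := by simp [hdd] at hhead; exact hhead
        have ht : t = l.drop (k+1) := by
          have := @List.tail_drop _ l k
          simp [hdd] at this; exact this
        rw [ha, ht]
    calc l = l.take k ++ l.drop k := (List.take_append_drop k l).symm
    _ = l.take k ++ c :: l.drop (k+1) := by rw [hd]
  · intro x hx hxc
    subst hxc
    obtain ⟨i, hi, hix⟩ := List.getElem_of_mem hx
    have hlen : (l.take k).length = k := List.length_take_of_le (le_of_lt hklt)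
    have hi' : i < k := by omega
    have hli : l[i] = (l.take k)[i] := List.getElem_take.symm
    refine hmin i hi' ((pv_singleton_prefix _ _).mpr ?_)
    rw [List.head?_drop, List.getElem?_eq_getElem (by omega)]
    rw [hli, hix]

-- outside a tag: every character is copied
lemma pv_foldl_false (l : List Char) (out : List Char) (h : ∀ x ∈ l, x ≠ '<') :
    List.foldl pvStepA (out, false) l = (out ++ l, false) := by
  induction l generalizing out with
  | nil => simp
  | cons a l ih =>
    have ha : a ≠ '<' := h a (by simp)
    simp [pvStepA, ha, ih _ (fun x hx => h x (by simp [hx]))]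

-- inside a tag: nothing happens until '>'
lemma pv_foldl_true (l : List Char) (out : List Char) (h : ∀ x ∈ l, x ≠ '>') :
    List.foldl pvStepA (out, true) l = (out, true) := by
  induction l with
  | nil => simp
  | cons a l ih =>
    have ha : a ≠ '>' := h a (by simp)
    by_cases h2 : a = '<' <;>
      simp [pvStepA, h2, ha, ih (fun x hx => h x (by simp [hx]))]

-- A's flag machine from the quiescent state computes B's chunk recursion
lemma pv_main (n : Nat) : ∀ (cs : List Char), cs.length ≤ n → ∀ out,
    (List.foldl pvStepA (out, false) cs).1 = out ++ pvGoB cs := by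
  induction n with
  | zero =>
    intro cs hcs out
    have : cs = [] := List.eq_nil_of_length_eq_zero (by omega)
    subst this
    rw [pvGoB]
    have : PySem.Chars.find ([] : List Char) ['<'] = -1 := by
      rw [PySem.Chars.find_eq_neg_one_iff]; simp
    simp [this]
  | succ n ih =>
    intro cs hcs out
    by_cases hlt : PySem.Chars.find cs ['<'] = -1
    · have hno : ∀ x ∈ cs, x ≠ '<' := by
        intro x hx hxc; subst hxc
        obtain ⟨s, t, hst⟩ := List.append_of_mem hx
        exact (PySem.Chars.find_eq_neg_one_iff cs ['<']).mp hlt ⟨s, t, by simp [hst]⟩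
      rw [pvGoB]; simp [hlt, pv_foldl_false cs out hno]
    · obtain ⟨hk, hdecomp, hpre⟩ := pv_find_char_split cs '<' hlt
      set k := (PySem.Chars.find cs ['<']).toNat with hkdef
      set rest := cs.drop k with hrest
      have hrestc : rest = '<' :: cs.drop (k+1) := by
        rw [hrest]
        conv_lhs => rw [hdecomp]
        rw [List.drop_append_of_le_length (by rw [List.length_take_of_le (le_of_lt hk)])]
        simp [List.length_take_of_le (le_of_lt hk)]
      by_cases hgt : PySem.Chars.find rest ['>'] = -1
      · -- unterminated tag: A stays in check_tag, B drops the tail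
        have hno : ∀ x ∈ cs.drop (k+1), x ≠ '>' := by
          intro x hx hxc; subst hxc
          obtain ⟨s, t, hst⟩ := List.append_of_mem hx
          refine (PySem.Chars.find_eq_neg_one_iff rest ['>']).mp hgt ⟨'<' :: s, t, ?_⟩
          simp [hrestc, hst]
        conv_lhs => rw [hdecomp]
        rw [List.foldl_append, pv_foldl_false _ out hpre]
        have : pvStepA (out ++ cs.take k, false) '<' = (out ++ cs.take k, true) := by
          simp [pvStepA]
        simp only [List.foldl_cons, this, pv_foldl_true _ _ hno]
        rw [pvGoB]
        rw [← hkdef, ← hrest]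
        simp [hlt, hgt]
      · obtain ⟨hg, hgdecomp, hgpre⟩ := pv_find_char_split rest '>' hgt
        set g := (PySem.Chars.find rest ['>']).toNat with hgdef
        set rem := rest.drop (g+1) with hrem
        have hg1 : 1 ≤ g := by
          by_contra h0
          have : g = 0 := by omega
          rw [this] at hgdecomp
          simp [hrestc] at hgdecomp
        obtain ⟨mid, hmid⟩ : ∃ mid, rest.take g = '<' :: mid := by
          rcases hgy : g with _ | g'
          · omega
          · exact ⟨(cs.drop (k+1)).take g', by rw [hrestc]; simp⟩
        have hmidno : ∀ x ∈ mid, x ≠ '>' := fun x hx => hgpre x (by rw [hmid]; simp [hx])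
        have htail : cs.drop (k+1) = mid ++ '>' :: rem := by
          have h1 : rest = '<' :: (mid ++ '>' :: rem) := by
            conv_lhs => rw [hgdecomp]
            rw [hmid]; simp
          rw [hrestc] at h1; simp at h1; exact h1
        have hremlen : rem.length ≤ n := by
          have h1 : rest.length = cs.length - k := by rw [hrest]; simp
          have h2 : rem.length = rest.length - (g+1) := by rw [hrem]; simp
          omega
        conv_lhs => rw [hdecomp]
        rw [List.foldl_append, pv_foldl_false _ out hpre, htail]
        have s1 : pvStepA (out ++ cs.take k, false) '<' = (out ++ cs.take k, true) := by
          simp [pvStepA]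
        have s2 : pvStepA (out ++ cs.take k, true) '>' = (out ++ cs.take k, false) := by
          simp [pvStepA]
        simp only [List.foldl_cons, s1, List.foldl_append, pv_foldl_true _ _ hmidno, s2]
        rw [ih rem hremlen]
        conv_rhs => rw [pvGoB]
        rw [← hkdef, ← hrest]
        simp only [dif_neg hlt, if_neg hgt]
        rw [← hgdef, ← hrem, List.append_assoc]

-- the initial check_tag assignment is redundant: the loop's first step recomputes it
lemma pv_init (cs : List Char) :
    List.foldl pvStepA ([], (PySem.List.pyGet? cs 0 == some '<')) cs
      = List.foldl pvStepA ([], false) cs := by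
  cases cs with
  | nil => simp [PySem.List.pyGet?, PySem.List.pyIdx?]
  | cons a l =>
    rw [PySem.List.pyGet?_zero_cons]
    by_cases h : a = '<'
    · subst h; simp [pvStepA]
    · have hb : (a == '<') = false := by simp [h]
      simp [hb]

-- ===== VERDICT (by name: the statement is the Claim_ definition above) =====
theorem selection_text_spec : Claim_equal_selection_text := by
  intro s _ _
  unfold Spec_selection_text selection_text selection_text_alt
  simp only [pv_init, pv_main s.toList.length s.toList le_rfl []]
  simp
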